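-- pv_equiv track=rewrite | github.com/dummyproj14/GraphFun | src/playersMindset/search.py | merge_chains
-- ===== SOURCE A (Python) =====
-- def merge_chains(chains):
--     """
--     Merge multiple chains of linked indices whenever possible (intersection between chains not empty)
--     Return the list of merged chains
--     (recursive function)
--     """
--     merged = []
--     if len(chains) < 1 : return []
--     if len(chains) < 2 : return [chains[0]]
--     if len(chains) == 2 :
--        if not chains[0].isdisjoint(chains[1]) :
--            chains[0].update(chains[1])
--            return [chains[0]] #accumulate results
--        return chains
--     head = chains[0]
--
--     # lookup for chains that can are not disjoint with head chain
--     joint = [ chain for chain in chains[1:] if not chain.isdisjoint(head)]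
--
--     # filter remaining chains
--     chains = [chain for chain in chains[1:] if chain not in joint] # remove mergable
--
--     # merge head with non disjoint chains
--     for chain in joint:
--         head.update(chain)
--
--     # return merged head and attempt to merge the rest
--     return [head]+merge_chains(chains)
-- ===== SOURCE B (Python) =====
-- def merge_chains(chains):
--     """One-pass merge using an inverted index element -> owning head.
--
--     A chain becomes a new head if none of its elements belongs to an earlier
--     head's original element set; otherwise it is absorbed into the earliest
--     such head. Mutates the head sets in place (like the original).
--     """
--     owner = {}   # element -> position in `out` of the head whose ORIGINAL set contains it
--     out = []
--     for chain in chains: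
--         hits = [owner[e] for e in chain if e in owner]
--         if hits:
--             out[min(hits)].update(chain)
--         else:
--             out.append(chain)
--             for e in chain:
--                 owner[e] = len(out) - 1
--     return out
-- ===== Notes on version B (the rewrite author's own statement) =====
-- stated objective: alternative
-- what changed: A recursively re-scans all remaining chains at every level; B makes a single left-to-right pass keeping an inverted index element->owning head, so each chain is either absorbed into the earliest intersecting head or becomes a new head, with no per-level rescanning (different algorithm; not measurably faster on the benchmark inputs).
import Mathlib
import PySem

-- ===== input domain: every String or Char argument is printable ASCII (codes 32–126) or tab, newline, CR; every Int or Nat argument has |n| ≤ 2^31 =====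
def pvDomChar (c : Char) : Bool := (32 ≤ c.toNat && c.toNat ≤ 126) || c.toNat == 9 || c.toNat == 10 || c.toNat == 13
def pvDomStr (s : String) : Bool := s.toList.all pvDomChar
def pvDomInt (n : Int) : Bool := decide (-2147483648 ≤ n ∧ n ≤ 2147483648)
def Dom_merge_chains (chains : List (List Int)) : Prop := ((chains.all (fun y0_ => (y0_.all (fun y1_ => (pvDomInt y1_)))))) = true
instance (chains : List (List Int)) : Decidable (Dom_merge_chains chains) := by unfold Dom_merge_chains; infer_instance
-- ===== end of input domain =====

-- B replaces A's level-by-level recursion (rescanning all remaining chains per level) with one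
-- left-to-right pass over an inverted index element -> owning head; both mutate the head sets in
-- place in Python, and the equivalence proved here is about the returned value.

-- ===== PORT A =====
-- literal transliteration of Source A (chains are Python sets = PySem.Set Int)
def merge_chains (chains : List (List Int)) : List (List Int) :=
  match chains with
  | [] => []
  | [c] => [c]
  | [c0, c1] =>
      if !(PySem.Set.isdisjoint c0 c1) then [PySem.Set.update c0 c1] else [c0, c1]
  | head :: rest =>
      let joint := rest.filter (fun chain => !(PySem.Set.isdisjoint chain head))
      -- Python's `chain not in joint` tests list membership with set equality
      let chains' := rest.filter (fun chain => !(joint.any (fun d => PySem.Set.equal chain d)))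
      let head' := joint.foldl (fun h chain => PySem.Set.update h chain) head
      head' :: merge_chains chains'
termination_by chains.length
decreasing_by
  simp only [List.length_cons, List.length_unattach]
  exact Nat.lt_succ_of_le ((List.length_filter_le _ _).trans (by simp))

-- ===== PORT B =====
-- literal transliteration of Source B: fold over the chains with state (owner dict, out list)
def merge_chains_alt (chains : List (List Int)) : List (List Int) :=
  (chains.foldl
    (fun (st : PySem.Dict Int Int × List (List Int)) chain =>
      let owner := st.1
      let out := st.2
      let hits := chain.filterMap (fun e => owner.get? e)
      match PySem.List.min? hits (fun x => x) with
      | some m =>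
          -- out[min(hits)].update(chain); owner values are list positions, hence ≥ 0
          (owner, out.modify m.toNat (fun s => PySem.Set.update s chain))
      | none =>
          let out := out ++ [chain]
          let owner := chain.foldl (fun d e => d.insert e ((out.length : Int) - 1)) owner
          (owner, out))
    (PySem.Dict.empty, [])).2

-- ===== PRECONDITION & SPEC =====
def Spec_merge_chains (chains : List (List Int)) (out : List (List Int)) : Prop := out = merge_chains_alt chains
instance (chains : List (List Int)) (out : List (List Int)) : Decidable (Spec_merge_chains chains out) := by unfold Spec_merge_chains; infer_instance

-- ===== CLAIM (what is proved, stated in full; the proofs are below) =====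
def Claim_equal_merge_chains : Prop := ∀ (chains : List (List Int)), Dom_merge_chains chains → Spec_merge_chains chains (merge_chains chains)

-- ===== LEMMAS AND PROOFS =====

-- the level-by-level recursion, written uniformly (proof-only intermediate)
def specMerge (chains : List (List Int)) : List (List Int) :=
  match chains with
  | [] => []
  | h :: t =>
      ((t.filter (fun c => !(PySem.Set.isdisjoint c h))).foldl
          (fun a c => PySem.Set.update a c) h)
        :: specMerge (t.filter (fun c => PySem.Set.isdisjoint c h))
termination_by chains.length
decreasing_by
  simp only [List.length_cons, List.length_unattach]
  exact Nat.lt_succ_of_le ((List.length_filter_le _ _).trans (by simp))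

theorem isdisjoint_comm (a b : List Int) :
    PySem.Set.isdisjoint a b = PySem.Set.isdisjoint b a := by
  rw [Bool.eq_iff_iff]
  simp [PySem.Set.isdisjoint, PySem.Set.contains]
  tauto

theorem equal_disjoint_congr {a b : List Int} (h : PySem.Set.equal a b = true) (u : List Int) :
    PySem.Set.isdisjoint a u = PySem.Set.isdisjoint b u := by
  rw [Bool.eq_iff_iff]
  simp [PySem.Set.equal, PySem.Set.issubset, PySem.Set.contains] at h
  simp [PySem.Set.isdisjoint, PySem.Set.contains]
  constructor
  · rintro h1 x hx; exact h1 x (h.2 x hx)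
  · rintro h1 x hx; exact h1 x (h.1 x hx)

theorem equal_refl (a : List Int) : PySem.Set.equal a a = true := by
  simp [PySem.Set.equal, PySem.Set.issubset, PySem.Set.contains]

-- A = specMerge
theorem merge_chains_eq_spec (chains : List (List Int)) :
    merge_chains chains = specMerge chains := by
  fun_induction merge_chains chains
  case case1 => simp [specMerge]
  case case2 c => simp [specMerge, PySem.Set.update]
  case case3 c0 c1 h =>
    simp only [Bool.not_eq_eq_eq_not, Bool.not_true] at h
    simp [specMerge, isdisjoint_comm c1 c0, h, PySem.Set.update]
  case case4 c0 c1 h =>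
    have h' : PySem.Set.isdisjoint c0 c1 = true := by
      revert h; cases PySem.Set.isdisjoint c0 c1 <;> simp
    simp [specMerge, isdisjoint_comm c1 c0, h']
  case case5 =>
    rename_i head rest h1 h2 joint0 chains0 ih
    have hfil : List.filter (fun chain => !(List.filter (fun c => !(PySem.Set.isdisjoint c head)) rest).any fun d => PySem.Set.equal chain d) rest
        = List.filter (fun c => PySem.Set.isdisjoint c head) rest := by
      apply List.filter_congr; intro c hc
      cases hb : PySem.Set.isdisjoint c head
      · have hm : c ∈ List.filter (fun c => !(PySem.Set.isdisjoint c head)) rest := by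
          simp [List.mem_filter, hc, hb]
        simp only [Bool.not_eq_false', List.any_eq_true]
        exact ⟨c, hm, equal_refl c⟩
      · simp only [Bool.not_eq_true', List.any_eq_false]
        intro d hd
        rw [List.mem_filter] at hd
        have hdj : PySem.Set.isdisjoint d head = false := by
          simpa using hd.2
        intro hcd
        rw [equal_disjoint_congr hcd head] at hb
        rw [hb] at hdj
        exact Bool.noConfusion hdj
    simp only [joint0, chains0, List.unattach_filter, List.unattach_attach] at ih
    rw [hfil] at ih
    show (List.foldl (fun h chain => PySem.Set.update h chain) head
        (List.filter (fun chain => !(PySem.Set.isdisjoint chain head)) rest)) ::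
      merge_chains (List.filter (fun chain =>
        !((List.filter (fun c => !(PySem.Set.isdisjoint c head)) rest).any fun d => PySem.Set.equal chain d)) rest)
      = specMerge (head :: rest)
    rw [hfil, ih]
    conv_rhs => rw [specMerge]

-- owner dict as B builds it, as a function of the list of original heads
def ownerAux (d : PySem.Dict Int Int) (p : Nat) (H : List (List Int)) : PySem.Dict Int Int :=
  match H with
  | [] => d
  | h :: t => ownerAux (h.foldl (fun d e => d.insert e (p : Int)) d) (p + 1) t

def mkOwner (H : List (List Int)) : PySem.Dict Int Int := ownerAux PySem.Dict.empty 0 H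

def noHit (H : List (List Int)) (c : List Int) : Bool :=
  H.all (fun h => PySem.Set.isdisjoint h c)

def minHit? (H : List (List Int)) (c : List Int) : Option Nat :=
  H.findIdx? (fun h => !(PySem.Set.isdisjoint h c))

-- absorbing only the chains that hit an existing head
def absorbOld (out H l : List (List Int)) : List (List Int) :=
  match l with
  | [] => out
  | c :: t =>
      match minHit? H c with
      | some k => absorbOld (out.modify k (fun s => PySem.Set.update s c)) H t
      | none => absorbOld out H t

def pwDisj (H : List (List Int)) : Prop :=
  H.Pairwise (fun a b => ∀ x, x ∈ a → x ∉ b)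

theorem ownerAux_append (d : PySem.Dict Int Int) (p : Nat) (H : List (List Int)) (c : List Int) :
    ownerAux d p (H ++ [c]) = c.foldl (fun d e => d.insert e ((p + H.length : Nat) : Int)) (ownerAux d p H) := by
  induction H generalizing d p with
  | nil => simp [ownerAux]
  | cons h t ihH =>
      simp only [List.cons_append, ownerAux, ihH, List.length_cons]
      have hpt : p + 1 + t.length = p + (t.length + 1) := by omega
      rw [hpt]

theorem get?_foldl_insert_const (l : List Int) (v : Int) (d : PySem.Dict Int Int) (e : Int) :
    (l.foldl (fun d x => d.insert x v) d).get? e = if l.contains e then some v else d.get? e := by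
  induction l generalizing d with
  | nil => simp
  | cons x t ih =>
      simp only [List.foldl_cons, ih]
      by_cases hxe : x = e
      · subst hxe
        by_cases ht : x ∈ t <;>
          simp [ht, PySem.Dict.get?_insert_self]
      · rw [PySem.Dict.get?_insert_of_ne d v (Ne.symm hxe)]
        by_cases hm : e ∈ t
        · simp [hm]
        · simp [hm]
          intro h
          exact absurd h.symm hxe

theorem get?_mkOwner_append (H : List (List Int)) (c : List Int) (e : Int) :
    (mkOwner (H ++ [c])).get? e =
      if c.contains e then some (H.length : Int) else (mkOwner H).get? e := by
  unfold mkOwner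
  rw [ownerAux_append, get?_foldl_insert_const]
  simp

-- characterisation of the owner dict
theorem get?_mkOwner_some {H : List (List Int)} {e : Int} {v : Int} :
    (mkOwner H).get? e = some v → ∃ (k : Nat) (hk : k < H.length), v = (k : Int) ∧ e ∈ H[k] := by
  induction H using List.reverseRecOn with
  | nil => simp [mkOwner, ownerAux, PySem.Dict.get?_empty]
  | append_singleton H c ih =>
      rw [get?_mkOwner_append]
      by_cases hc : c.contains e
      · simp only [hc, if_true]
        intro hv
        refine ⟨H.length, by simp, by simpa using hv.symm, ?_⟩
        have hec : e ∈ c := by simpa [List.contains_eq_mem] using hc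
        simp [hec]
      · simp only [hc]
        intro hv
        obtain ⟨k, hk, hvk, hek⟩ := ih hv
        exact ⟨k, by simp; omega, hvk, by rw [List.getElem_append_left hk]; exact hek⟩

theorem get?_mkOwner_of_mem {H : List (List Int)} (hd : pwDisj H) {e : Int} {k : Nat}
    (hk : k < H.length) (he : e ∈ H[k]) : (mkOwner H).get? e = some (k : Int) := by
  induction H using List.reverseRecOn with
  | nil => simp at hk
  | append_singleton H c ih =>
      rw [get?_mkOwner_append]
      rw [List.length_append, List.length_singleton] at hk
      by_cases hkH : k < H.length
      · have heH : e ∈ H[k] := by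
          rw [List.getElem_append_left hkH] at he; exact he
        have hdH : pwDisj H := (List.pairwise_append.mp hd).1
        have hnc : e ∉ c := by
          have := (List.pairwise_append.mp hd).2.2 H[k] (List.getElem_mem hkH) c (by simp)
          exact this e heH
        have hcc : c.contains e = false := by
          simpa [List.contains_eq_mem] using hnc
        rw [hcc]
        simp only [Bool.false_eq_true, if_false]
        exact ih hdH hkH heH
      · have hkk : k = H.length := by omega
        subst hkk
        have hec : e ∈ c := by
          simpa [List.getElem_concat_length] using he
        have : c.contains e = true := by simpa [List.contains_eq_mem] using hec
        rw [this]
        simp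

theorem modify_append_left {α : Type} (out l2 : List α) (k : Nat) (f : α → α) (h : k < out.length) :
    (out ++ l2).modify k f = out.modify k f ++ l2 := by
  induction out generalizing k with
  | nil => simp at h
  | cons x t ih =>
      cases k with
      | zero => simp [List.modify]
      | succ n =>
          simp only [List.cons_append, List.modify_succ_cons]
          rw [ih n (by simpa using h)]

theorem modify_append_mid {α : Type} (out l2 : List α) (c : α) (f : α → α) :
    (out ++ c :: l2).modify out.length f = out ++ f c :: l2 := by
  induction out with
  | nil => simp [List.modify]
  | cons x t ih =>
      simp only [List.cons_append, List.length_cons, List.modify_succ_cons]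
      rw [ih]

theorem minHit?_eq_none_iff (H : List (List Int)) (c : List Int) :
    minHit? H c = none ↔ noHit H c = true := by
  simp only [minHit?, noHit, List.findIdx?_eq_none_iff, List.all_eq_true]
  constructor
  · intro h x hx; simpa using h x hx
  · intro h x hx; simpa using h x hx

theorem noHit_append (H : List (List Int)) (c0 x : List Int) :
    noHit (H ++ [c0]) x = (noHit H x && PySem.Set.isdisjoint c0 x) := by
  simp [noHit, List.all_append]

theorem minHit?_append_some {H : List (List Int)} {c0 c' : List Int} {k : Nat}
    (hm : minHit? H c' = some k) : minHit? (H ++ [c0]) c' = some k := by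
  simp only [minHit?] at hm ⊢
  rw [List.findIdx?_append, hm]
  rfl

theorem minHit?_lt {H : List (List Int)} {c' : List Int} {k : Nat}
    (hm : minHit? H c' = some k) : k < H.length := by
  simp only [minHit?] at hm
  exact (List.findIdx?_eq_some_iff_getElem.mp hm).1

theorem noHit_false_of_minHit?_some {H : List (List Int)} {c' : List Int} {k : Nat}
    (hm : minHit? H c' = some k) : noHit H c' = false := by
  cases h : noHit H c'
  · rfl
  · rw [← minHit?_eq_none_iff] at h
    rw [h] at hm
    simp at hm

theorem minHit?_append_of_none {H : List (List Int)} {c0 c' : List Int}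
    (hm : minHit? H c' = none) :
    minHit? (H ++ [c0]) c' =
      if PySem.Set.isdisjoint c0 c' then none else some H.length := by
  simp only [minHit?] at hm ⊢
  rw [List.findIdx?_append, hm]
  cases hp : PySem.Set.isdisjoint c0 c' <;> simp [List.findIdx?_cons, hp]

-- the key fold lemma
theorem absorbOld_append (H : List (List Int)) (c0 : List Int) :
    ∀ (t out : List (List Int)) (c : List Int), out.length = H.length →
    absorbOld (out ++ [c]) (H ++ [c0]) t =
      absorbOld out H t ++
        [ (t.filter (fun x => noHit H x && !(PySem.Set.isdisjoint c0 x))).foldl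
            (fun a x => PySem.Set.update a x) c ] := by
  intro t
  induction t with
  | nil =>
      intro out c hlen
      simp [absorbOld]
  | cons c' t ih =>
      intro out c hlen
      cases hm : minHit? H c' with
      | some k =>
          have hk : k < H.length := minHit?_lt hm
          have hm' : minHit? (H ++ [c0]) c' = some k := minHit?_append_some hm
          have hnh : noHit H c' = false := noHit_false_of_minHit?_some hm
          simp only [absorbOld, hm, hm']
          rw [modify_append_left _ _ _ _ (by omega)]
          rw [ih _ _ (by simp [hlen])]
          simp [hnh]
      | none =>
          have hnh : noHit H c' = true := (minHit?_eq_none_iff H c').mp hm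
          cases hp : PySem.Set.isdisjoint c0 c' with
          | false =>
              have hm' : minHit? (H ++ [c0]) c' = some H.length := by
                rw [minHit?_append_of_none hm, hp]; simp
              simp only [absorbOld, hm, hm']
              have hmid : (out ++ [c]).modify H.length (fun s => PySem.Set.update s c')
                  = out ++ [PySem.Set.update c c'] := by
                rw [← hlen]
                exact modify_append_mid out [] c _
              rw [hmid, ih _ _ hlen]
              simp [hnh, hp]
          | true =>
              have hm' : minHit? (H ++ [c0]) c' = none := by
                rw [minHit?_append_of_none hm, hp]; simp
              simp only [absorbOld, hm, hm']
              rw [ih _ _ hlen]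
              simp [hnh, hp]

theorem noHit_of_hits_nil {H : List (List Int)} (hd : pwDisj H) {c : List Int}
    (h : c.filterMap (fun e => (mkOwner H).get? e) = []) : noHit H c = true := by
  rw [List.filterMap_eq_nil_iff] at h
  simp only [noHit, List.all_eq_true]
  intro x hx
  cases hdis : PySem.Set.isdisjoint x c
  · exfalso
    have : ∃ e ∈ x, e ∈ c := by
      simpa [PySem.Set.isdisjoint, PySem.Set.contains, List.any_eq_true] using hdis
    obtain ⟨e, hex, hec⟩ := this
    obtain ⟨k, hk, hxk⟩ := List.mem_iff_getElem.mp hx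
    have hn := h e hec
    rw [get?_mkOwner_of_mem hd hk (by rw [hxk]; exact hex)] at hn
    simp at hn
  · rfl

theorem minHit?_of_min?_some {H : List (List Int)} (hd : pwDisj H) {c : List Int} {m : Int}
    (h : PySem.List.min? (c.filterMap (fun e => (mkOwner H).get? e)) (fun x => x) = some m) :
    0 ≤ m ∧ minHit? H c = some m.toNat := by
  have hmem := PySem.List.min?_mem h
  rw [List.mem_filterMap] at hmem
  obtain ⟨e, hec, hge⟩ := hmem
  obtain ⟨k, hk, hvk, hek⟩ := get?_mkOwner_some hge
  subst hvk
  refine ⟨Int.natCast_nonneg k, ?_⟩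
  simp only [Int.toNat_natCast, minHit?]
  rw [List.findIdx?_eq_some_iff_getElem]
  refine ⟨hk, ?_, ?_⟩
  · have : PySem.Set.isdisjoint H[k] c = false := by
      simp only [PySem.Set.isdisjoint, PySem.Set.contains]
      simp only [Bool.not_eq_false', List.any_eq_true]
      exact ⟨e, hek, by simpa [List.contains_eq_mem] using hec⟩
    simp [this]
  · intro j hj hpj
    have hhit : ∃ e' ∈ H[j], e' ∈ c := by
      simpa [PySem.Set.isdisjoint, PySem.Set.contains] using hpj
    obtain ⟨e', he'H, he'c⟩ := hhit
    have hget : (mkOwner H).get? e' = some (j : Int) := get?_mkOwner_of_mem hd (by omega) he'H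
    have hjin : (j : Int) ∈ c.filterMap (fun e => (mkOwner H).get? e) := by
      rw [List.mem_filterMap]; exact ⟨e', he'c, hget⟩
    have := PySem.List.min?_isMin h _ hjin
    simp at this
    omega

theorem main_fold (l : List (List Int)) :
    ∀ (out H : List (List Int)), pwDisj H → out.length = H.length →
    (l.foldl
      (fun (st : PySem.Dict Int Int × List (List Int)) chain =>
        let owner := st.1
        let out := st.2
        let hits := chain.filterMap (fun e => owner.get? e)
        match PySem.List.min? hits (fun x => x) with
        | some m => (owner, out.modify m.toNat (fun s => PySem.Set.update s chain))
        | none =>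
            let out := out ++ [chain]
            let owner := chain.foldl (fun d e => d.insert e ((out.length : Int) - 1)) owner
            (owner, out))
      (mkOwner H, out)).2
    = absorbOld out H l ++ specMerge (l.filter (noHit H)) := by
  induction l with
  | nil =>
      intro out H hd hlen
      simp [absorbOld, specMerge]
  | cons c t ih =>
      intro out H hd hlen
      rw [List.foldl_cons]
      dsimp only
      cases hmin : PySem.List.min? (c.filterMap fun e => (mkOwner H).get? e) (fun x => x) with
      | some m =>
          obtain ⟨hm0, hmH⟩ := minHit?_of_min?_some hd hmin
          have hnh : noHit H c = false := noHit_false_of_minHit?_some hmH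
          dsimp only
          rw [ih (out.modify m.toNat (fun s => PySem.Set.update s c)) H hd
            (by simpa using hlen)]
          have hro : absorbOld out H (c :: t)
              = absorbOld (out.modify m.toNat (fun s => PySem.Set.update s c)) H t := by
            simp [absorbOld, hmH]
          rw [hro]
          simp [hnh]
      | none =>
          have hnh : noHit H c = true := noHit_of_hits_nil hd ((PySem.List.min?_eq_none_iff _ _).mp hmin)
          dsimp only
          have hdall : ∀ y ∈ H, PySem.Set.isdisjoint y c = true := by
            simpa [noHit, List.all_eq_true] using hnh
          have harg : (((out ++ [c]).length : Nat) : Int) - 1 = ((0 + H.length : Nat) : Int) := by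
            simp [hlen]
          have howner : c.foldl (fun d e => d.insert e (((out ++ [c]).length : Int) - 1)) (mkOwner H)
              = mkOwner (H ++ [c]) := by
            conv_rhs => rw [mkOwner, ownerAux_append]
            simp only [harg]
            rfl
          have hd' : pwDisj (H ++ [c]) := by
            rw [pwDisj, List.pairwise_append]
            refine ⟨hd, List.pairwise_singleton _ _, ?_⟩
            intro a ha b hb x hxa hxb
            rw [List.mem_singleton] at hb
            subst hb
            have := hdall a ha
            have hall : ∀ y ∈ a, y ∉ b := by
              simpa [PySem.Set.isdisjoint, PySem.Set.contains] using this
            exact hall x hxa hxb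
          rw [howner, ih (out ++ [c]) (H ++ [c]) hd' (by simp [hlen])]
          rw [absorbOld_append H c t out c hlen]
          have hao : absorbOld out H (c :: t) = absorbOld out H t := by
            simp [absorbOld, (minHit?_eq_none_iff H c).mpr hnh]
          rw [hao]
          have hfil1 : t.filter (noHit (H ++ [c]))
              = (t.filter (noHit H)).filter (fun x => PySem.Set.isdisjoint x c) := by
            rw [List.filter_filter]
            apply List.filter_congr
            intro x _
            rw [noHit_append, isdisjoint_comm c x, Bool.and_comm]
          have hfil2 : t.filter (fun x => noHit H x && !(PySem.Set.isdisjoint c x))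
              = (t.filter (noHit H)).filter (fun x => !(PySem.Set.isdisjoint x c)) := by
            rw [List.filter_filter]
            apply List.filter_congr
            intro x _
            rw [isdisjoint_comm c x, Bool.and_comm]
          rw [hfil1, hfil2]
          have hcf : (c :: t).filter (noHit H) = c :: t.filter (noHit H) := by
            simp [hnh]
          rw [hcf]
          conv_rhs => rw [specMerge]
          rw [List.append_assoc]
          rfl

theorem absorbOld_nil (l : List (List Int)) : absorbOld [] [] l = [] := by
  induction l with
  | nil => rfl
  | cons c t ih =>
      have : minHit? ([] : List (List Int)) c = none := by simp [minHit?]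
      simp [absorbOld, this, ih]

theorem merge_chains_alt_eq_spec (chains : List (List Int)) :
    merge_chains_alt chains = specMerge chains := by
  unfold merge_chains_alt
  rw [show (PySem.Dict.empty : PySem.Dict Int Int) = mkOwner [] from rfl]
  rw [main_fold chains [] [] (by simp [pwDisj]) rfl]
  rw [absorbOld_nil]
  have hfe : chains.filter (noHit []) = chains :=
    List.filter_eq_self.mpr (fun a _ => by simp [noHit])
  simp [hfe]

-- ===== VERDICT (by name: the statement is the Claim_ definition above) =====
theorem merge_chains_spec : Claim_equal_merge_chains := by
  intro chains _
  unfold Spec_merge_chains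
  rw [merge_chains_eq_spec, merge_chains_alt_eq_spec]
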